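-- pv_equiv track=rewrite | github.com/k-harada/AtCoder | other_contests/keyence2021/B.py | solve
-- ===== SOURCE A (Python) =====
-- from collections import defaultdict
--
-- def solve(n, k, a_list):
--     count_dict = defaultdict(int)
--     for a in a_list:
--         count_dict[a] += 1
--     res = 0
--     width = k
--     for i in range(n + 1):
--         c = min(count_dict[i], k)
--         if c < width:
--             res += (width - c) * i
--             width = c
--     return res
-- ===== SOURCE B (Python) =====
-- from collections import defaultdict
--
-- def solve(n, k, a_list):
--     # Running prefix-minimum w = min(k, count[0..i]) with a plain running sum,
--     # returning total - n*w at i == n (summation by parts); stops early once w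
--     # hits 0, since all later prefix minima are 0 and contribute nothing.
--     cnt = defaultdict(int)
--     for a in a_list:
--         cnt[a] += 1
--     total = 0
--     w = k
--     i = 0
--     while i < n + 1:
--         if cnt[i] < w:
--             w = cnt[i]
--         if w == 0:
--             return total
--         if i == n:
--             return total - n * w
--         total += w
--         i += 1
--     return 0
-- ===== Notes on version B (the rewrite author's own statement) =====
-- stated objective: alternative
-- what changed: B replaces A's weighted width-drop accumulation (res += (width-c)*i with capped counts) by a while loop maintaining the running prefix minimum w and its plain running sum, returning total - n*w at i == n by summation by parts, and exits early as soon as w reaches 0 since all later prefix minima are 0.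
import Mathlib
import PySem

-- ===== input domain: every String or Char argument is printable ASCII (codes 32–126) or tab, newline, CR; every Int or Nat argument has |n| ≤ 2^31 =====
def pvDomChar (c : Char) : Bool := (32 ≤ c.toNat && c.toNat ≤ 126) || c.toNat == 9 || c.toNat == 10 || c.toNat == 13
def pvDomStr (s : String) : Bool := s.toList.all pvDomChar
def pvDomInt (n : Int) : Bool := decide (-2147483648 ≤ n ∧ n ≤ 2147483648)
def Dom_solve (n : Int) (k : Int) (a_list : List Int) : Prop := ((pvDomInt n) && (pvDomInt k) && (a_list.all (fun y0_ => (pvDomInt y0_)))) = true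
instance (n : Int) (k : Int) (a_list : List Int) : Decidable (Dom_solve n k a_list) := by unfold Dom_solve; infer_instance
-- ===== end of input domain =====

-- B maintains the running prefix minimum and its plain running sum (with an early exit once
-- the minimum hits 0) instead of A's weighted width drops; same result, alternative decomposition.

-- ===== PORT A =====
-- loop body of A: c = min(count_dict[i], k); if c < width: res += (width - c) * i; width = c
def solveStep (cnt : PySem.Dict Int Int) (k : Int) (s : Int × Int) (i : Int) : Int × Int :=
  let c := min (cnt.getD i 0) k
  if c < s.2 then (s.1 + (s.2 - c) * i, c) else s

def solve (n : Int) (k : Int) (a_list : List Int) : Int :=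
  let cnt : PySem.Dict Int Int := a_list.foldl (fun d a => d.modify a 0 (· + 1)) PySem.Dict.empty
  ((PySem.List.pyRange 0 (n + 1) 1).foldl (solveStep cnt k) (0, k)).1

-- ===== PORT B =====
-- Source B's 'while i < n + 1' loop with its two early returns; fuel = (n + 1 - i).toNat,
-- and running out of fuel is the loop's exit condition (reached only when n < 0): return 0.
def solveAltLoop (cnt : PySem.Dict Int Int) (n : Int) : Nat → Int → Int → Int → Int
  | 0, _, _, _ => 0
  | fuel + 1, i, total, w =>
      let w' := if cnt.getD i 0 < w then cnt.getD i 0 else w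
      if w' = 0 then total
      else if i = n then total - n * w'
      else solveAltLoop cnt n fuel (i + 1) (total + w') w'

def solve_alt (n : Int) (k : Int) (a_list : List Int) : Int :=
  let cnt : PySem.Dict Int Int := a_list.foldl (fun d a => d.modify a 0 (· + 1)) PySem.Dict.empty
  solveAltLoop cnt n (n + 1 - 0).toNat 0 0 k

-- ===== PRECONDITION & SPEC =====
def Spec_solve (n : Int) (k : Int) (a_list : List Int) (out : Int) : Prop := out = solve_alt n k a_list
instance (n : Int) (k : Int) (a_list : List Int) (out : Int) : Decidable (Spec_solve n k a_list out) := by unfold Spec_solve; infer_instance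

-- ===== CLAIM (what is proved, stated in full; the proofs are below) =====
def Claim_equal_solve : Prop := ∀ (n : Int) (k : Int) (a_list : List Int), Dom_solve n k a_list → Spec_solve n k a_list (solve n k a_list)

-- ===== LEMMAS AND PROOFS =====

-- once A's width is 0 (and counts and k are nonnegative) A's fold no longer changes state
lemma solveStep_fixed_zero (cnt : PySem.Dict Int Int) (k : Int)
    (hk : 0 ≤ k) (hc : ∀ j : Int, 0 ≤ cnt.getD j 0) :
    ∀ (l : List Int) (res : Int), l.foldl (solveStep cnt k) (res, 0) = (res, 0) := by
  intro l
  induction l with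
  | nil => intro res; rfl
  | cons j t ih =>
      intro res
      have h : ¬ min (cnt.getD j 0) k < (0 : Int) := by
        have := hc j; omega
      simp only [List.foldl_cons, solveStep, h]
      exact ih res

-- main loop correspondence: A's fold over [i, n+1) from (total - i*w, w) equals B's loop
lemma solve_loop_eq (cnt : PySem.Dict Int Int) (k : Int)
    (hc : ∀ j : Int, 0 ≤ cnt.getD j 0) :
    ∀ (fuel : ℕ) (i : Int), (n + 1 - i).toNat = fuel →
    ∀ (total w : Int), w ≤ k → (n + 1 ≤ i → i = 0 ∧ total = 0) →
    ((PySem.List.pyRange i (n + 1) 1).foldl (solveStep cnt k) (total - i * w, w)).1 =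
      solveAltLoop cnt n fuel i total w := by
  intro fuel
  induction fuel with
  | zero =>
      intro i hf total w _ hend
      have hni : n + 1 ≤ i := by omega
      obtain ⟨hi0, ht0⟩ := hend hni
      rw [PySem.List.pyRange_one_eq_nil hni]
      simp [solveAltLoop, hi0, ht0]
  | succ m ih =>
      intro i hf total w hwk _
      have hib : i < n + 1 := by omega
      rw [PySem.List.pyRange_one_cons hib]
      simp only [List.foldl_cons]
      set c := cnt.getD i 0 with hcdef
      have hc0 : 0 ≤ c := hc i
      set w' : Int := if c < w then c else w with hw'
      have hstep : solveStep cnt k (total - i * w, w) i = (total - i * w', w') := by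
        simp only [solveStep]
        by_cases hlt : c < w
        · have hmin : min c k = c := by omega
          have : min (cnt.getD i 0) k < w := by rw [← hcdef, hmin]; omega
          rw [if_pos this]
          simp only [hw', if_pos hlt, ← hcdef, hmin]
          have : total - i * w + (w - c) * i = total - i * c := by ring
          rw [this]
        · have : ¬ min (cnt.getD i 0) k < w := by rw [← hcdef]; omega
          rw [if_neg this]
          simp only [hw', if_neg hlt]
      rw [hstep]
      simp only [solveAltLoop, ← hcdef, ← hw']
      by_cases hz : w' = 0
      · rw [if_pos hz]
        have hk0 : 0 ≤ k := by
          simp only [hw'] at hz; split_ifs at hz <;> omega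
        rw [hz]
        have := solveStep_fixed_zero cnt k hk0 hc (PySem.List.pyRange (i + 1) (n + 1) 1) (total - i * 0)
        rw [this]
        simp
      · rw [if_neg hz]
        by_cases hin : i = n
        · rw [if_pos hin]
          subst hin
          rw [PySem.List.pyRange_one_eq_nil (by omega)]
          simp
        · rw [if_neg hin]
          have hrec := ih (i + 1) (by omega) (total + w') w'
            (by simp only [hw']; split_ifs <;> omega)
            (by intro h; omega)
          have harg : total + w' - (i + 1) * w' = total - i * w' := by ring
          rw [harg] at hrec
          exact hrec

-- counts produced by the counter fold are nonnegative
lemma counter_nonneg (a_list : List Int) (j : Int) :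
    (0 : Int) ≤ (a_list.foldl (fun d a => d.modify a 0 (· + 1)) (PySem.Dict.empty : PySem.Dict Int Int)).getD j 0 := by
  rw [show (a_list.foldl (fun d a => d.modify a 0 (· + 1)) (PySem.Dict.empty : PySem.Dict Int Int)) = PySem.Dict.counter a_list from rfl]
  rw [PySem.Dict.getD_counter]
  exact Int.natCast_nonneg _

-- ===== VERDICT (by name: the statement is the Claim_ definition above) =====
theorem solve_spec : Claim_equal_solve := by
  intro n k a_list _
  unfold Spec_solve solve solve_alt
  have := solve_loop_eq (n := n)
    (a_list.foldl (fun d a => d.modify a 0 (· + 1)) PySem.Dict.empty) k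
    (counter_nonneg a_list) (n + 1 - 0).toNat 0 rfl 0 k le_rfl (by intro h; exact ⟨rfl, rfl⟩)
  simpa using this
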